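-- pv_equiv track=rewrite | github.com/gyjames/Fungen | script/get_minimizers.py | compress_sequence_qual
-- ===== SOURCE A (Python) =====
-- from collections import deque, Counter
-- import itertools
--
-- def compress_sequence_qual(sequence,qual):
-- 	nc2num = {'A':'0', 'a':'0', 'C':'1', 'c':'1', 'G':'2', 'g':'2', 'T':'3', 't':'3', 'N': '4', 'n': '4'}
-- 	compressed_sequence = ''.join([nc2num[chr_] for chr_,_ in itertools.groupby(sequence) if chr_ in nc2num])
-- 	compressed_num = [len([z for z in ob]) for chr_,ob in itertools.groupby(sequence)]
-- 	de_qual,compressed_qual = deque(qual),[]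
-- 	for k in compressed_num:
-- 		compressed_qual.append(min([de_qual[kn] for kn in range(k)]))
-- 		t = [de_qual.popleft() for i in range(0,k)]
-- 	compressed_num_str = ''.join([str(k)+':' for k in compressed_num])
-- 	compressed_qual_str = ''.join([str(q) for q in compressed_qual])
-- 	return compressed_sequence,compressed_qual_str,compressed_num_str
-- ===== SOURCE B (Python) =====
-- from itertools import groupby
--
-- def compress_sequence_qual(sequence, qual):
--     nc2num = {'A':'0','a':'0','C':'1','c':'1','G':'2','g':'2','T':'3','t':'3','N':'4','n':'4'}
--     digits = []
--     lens = []
--     mins = []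
--     idx = 0
--     for ch, grp in groupby(sequence):
--         k = sum(1 for _ in grp)
--         if ch in nc2num:
--             digits.append(nc2num[ch])
--         lens.append(k)
--         mins.append(min(qual[idx + j] for j in range(k)))
--         idx += k
--     return ''.join(digits), ''.join(mins), ''.join(str(k) + ':' for k in lens)
-- ===== Notes on version B (the rewrite author's own statement) =====
-- stated objective: alternative
-- what changed: B makes a single groupby pass with an integer cursor into qual, accumulating digits, run lengths and per-run minima in one loop, instead of A's two separate groupby passes plus a deque that is indexed and then popped run by run.
import Mathlib
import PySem

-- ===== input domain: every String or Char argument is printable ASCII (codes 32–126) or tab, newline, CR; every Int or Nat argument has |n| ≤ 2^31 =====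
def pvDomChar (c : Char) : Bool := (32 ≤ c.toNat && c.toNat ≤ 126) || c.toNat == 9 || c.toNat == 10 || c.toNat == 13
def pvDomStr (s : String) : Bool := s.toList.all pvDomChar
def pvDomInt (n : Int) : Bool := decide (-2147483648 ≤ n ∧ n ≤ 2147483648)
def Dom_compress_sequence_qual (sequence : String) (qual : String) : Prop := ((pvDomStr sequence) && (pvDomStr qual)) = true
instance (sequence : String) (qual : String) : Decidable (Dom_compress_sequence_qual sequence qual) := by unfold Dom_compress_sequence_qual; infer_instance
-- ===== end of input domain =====

-- B replaces A's two groupby passes + deque popping by ONE groupby pass with an integer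
-- cursor into qual; return-value equivalence only (neither mutates its arguments).

-- shared helper: itertools.groupby over a list of characters, as (key, group) pairs
def pyGroupby : List Char → List (Char × List Char)
  | [] => []
  | c :: rest =>
    match pyGroupby rest with
    | [] => [(c, [c])]
    | (d, g) :: t => if c = d then (c, c :: g) :: t else (c, [c]) :: (d, g) :: t

-- the literal dict nc2num
def pvNc2num : PySem.Dict Char Char :=
  PySem.Dict.ofList [('A','0'),('a','0'),('C','1'),('c','1'),('G','2'),('g','2'),
                     ('T','3'),('t','3'),('N','4'),('n','4')]

-- ===== PORT A =====
-- A's for-loop over compressed_num: min over deque indices 0..k-1, then popleft k times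
def pvLoopA : List Nat → List Char → List Char
  | [], _ => []
  | k :: ks, dq =>
    (PySem.List.min? ((List.range k).filterMap (fun kn => dq[kn]?)) (fun x => x)).toList
      ++ pvLoopA ks (dq.drop k)

def compress_sequence_qual (sequence : String) (qual : String) : String × String × String :=
  let gs := pyGroupby sequence.toList
  let compressed_sequence := String.ofList (gs.filterMap (fun p => pvNc2num.get? p.1))
  let compressed_num := gs.map (fun p => p.2.length)
  let compressed_qual := pvLoopA compressed_num qual.toList
  let compressed_num_str :=
    String.ofList ((compressed_num.map (fun k => (PySem.Int.toStr (k : Int)).toList ++ [':'])).flatten)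
  (compressed_sequence, String.ofList compressed_qual, compressed_num_str)

-- ===== PORT B =====
-- one loop body: state (digits, lens, mins, idx), per-run min by indexing qual at idx+j
def pvStepB (q : List Char) (st : List Char × List Nat × List Char × Nat)
    (g : Char × List Char) : List Char × List Nat × List Char × Nat :=
  let k := g.2.length
  let digits := match pvNc2num.get? g.1 with
    | some v => st.1 ++ [v]
    | none => st.1
  let mins := st.2.2.1 ++
    (PySem.List.min? ((List.range k).filterMap (fun j => q[st.2.2.2 + j]?)) (fun x => x)).toList
  (digits, st.2.1 ++ [k], mins, st.2.2.2 + k)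

def compress_sequence_qual_alt (sequence : String) (qual : String) : String × String × String :=
  let st := (pyGroupby sequence.toList).foldl (pvStepB qual.toList) ([], [], [], 0)
  (String.ofList st.1, String.ofList st.2.2.1,
   String.ofList ((st.2.1.map (fun k => (PySem.Int.toStr (k : Int)).toList ++ [':'])).flatten))

-- ===== PRECONDITION & SPEC =====
-- Pre_ excludes qual shorter than sequence: there the Python A raises IndexError
-- (the deque runs out while indexing), so it returns no value to match.
def Pre_compress_sequence_qual (sequence : String) (qual : String) : Prop :=
  sequence.toList.length ≤ qual.toList.length

instance (sequence : String) (qual : String) : Decidable (Pre_compress_sequence_qual sequence qual) := by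
  unfold Pre_compress_sequence_qual; infer_instance

def pvWitness_compress_sequence_qual : String × String := ("AAcX", "hq!z")

def Spec_compress_sequence_qual (sequence : String) (qual : String) (out : String × String × String) : Prop :=
  out = compress_sequence_qual_alt sequence qual
instance (sequence : String) (qual : String) (out : String × String × String) : Decidable (Spec_compress_sequence_qual sequence qual out) := by
  unfold Spec_compress_sequence_qual; infer_instance

-- ===== CLAIM (what is proved, stated in full; the proofs are below) =====
def Claim_equal_compress_sequence_qual : Prop := ∀ (sequence : String) (qual : String), Dom_compress_sequence_qual sequence qual → Pre_compress_sequence_qual sequence qual → Spec_compress_sequence_qual sequence qual (compress_sequence_qual sequence qual)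

-- ===== LEMMAS AND PROOFS =====

-- B's fold, characterised
lemma foldB_eq (q : List Char) (gs : List (Char × List Char)) :
    ∀ (d0 : List Char) (l0 : List Nat) (m0 : List Char) (idx : Nat),
    gs.foldl (pvStepB q) (d0, l0, m0, idx) =
      (d0 ++ gs.filterMap (fun p => pvNc2num.get? p.1),
       l0 ++ gs.map (fun p => p.2.length),
       m0 ++ pvLoopA (gs.map (fun p => p.2.length)) (q.drop idx),
       idx + (gs.map (fun p => p.2.length)).sum) := by
  induction gs with
  | nil => intro d0 l0 m0 idx; simp [pvLoopA]
  | cons g t ih =>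
    intro d0 l0 m0 idx
    rw [List.foldl_cons, pvStepB]
    rw [ih]
    rw [List.filterMap_cons]
    cases h : pvNc2num.get? g.1 <;>
      simp [pvLoopA, List.drop_drop, Nat.add_assoc]

-- ===== VERDICT (by name: the statement is the Claim_ definition above) =====
theorem compress_sequence_qual_spec : Claim_equal_compress_sequence_qual := by
  intro sequence qual _ _
  unfold Spec_compress_sequence_qual compress_sequence_qual compress_sequence_qual_alt
  rw [foldB_eq]
  simp
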